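-- pv_equiv track=rewrite | github.com/iknowyoursecret/siameseCBOW | preprocess/getPosData.py | get_postive_data_ls
-- ===== SOURCE A (Python) =====
-- def get_postive_data_ls(idx, n_pos):
--     """
--     根据正例个数，获取正例集
--     :param idx:主句的索引
--     :param n_pos:正例个数
--     :return:正例集（里边是句子的索引）
--     """
--     div, mod = divmod(n_pos, 2)
--     if mod:  # 当正例集是单数时
--         # div, mod = divmod(n_pos, 2)
--         n_pos_ls = [pos_idx for pos_idx in range(idx - div, idx + div + 2)]
--     else:
--         n_pos_ls = [pos_idx for pos_idx in range(idx - div, idx + div + 1)]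
--     n_pos_ls.remove(idx)
--     return n_pos_ls
-- ===== SOURCE B (Python) =====
-- def get_postive_data_ls(idx, n_pos):
--     """Enumerate output positions 0..n_pos-1 and map each position k to its
--     sentence index by a closed-form formula that skips the center."""
--     div = n_pos // 2
--     return [idx - div + k + (k >= div) for k in range(n_pos)]
-- ===== Notes on version B (the rewrite author's own statement) =====
-- stated objective: alternative
-- what changed: B enumerates output positions 0..n_pos-1 once and maps each position k to idx - n_pos//2 + k + (k >= n_pos//2), a closed-form index map that skips the center, instead of materialising a range around idx and mutating it with list.remove(idx).
-- crash fix: For n_pos < 0 the range A builds is empty so n_pos_ls.remove(idx) raises ValueError; B's range(n_pos) is empty there and it returns []. — e.g. on get_postive_data_ls(5, -1): A raises ValueError, B returns []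
import Mathlib
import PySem

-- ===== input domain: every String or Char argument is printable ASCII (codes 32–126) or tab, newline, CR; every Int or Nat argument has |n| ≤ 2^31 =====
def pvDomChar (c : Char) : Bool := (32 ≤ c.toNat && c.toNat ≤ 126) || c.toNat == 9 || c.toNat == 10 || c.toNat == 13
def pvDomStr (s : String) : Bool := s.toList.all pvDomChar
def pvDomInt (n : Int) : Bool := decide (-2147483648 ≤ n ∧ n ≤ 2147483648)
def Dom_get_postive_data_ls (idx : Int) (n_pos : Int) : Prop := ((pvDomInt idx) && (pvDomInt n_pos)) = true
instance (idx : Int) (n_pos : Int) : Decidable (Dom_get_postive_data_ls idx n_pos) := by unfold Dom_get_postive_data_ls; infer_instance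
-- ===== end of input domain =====

-- B enumerates the output positions 0..n_pos-1 once and maps each position to its
-- index by a closed-form formula skipping the center, instead of building a range
-- around idx and removing idx from it (alternative decomposition; same cost).

-- ===== PORT A =====
def get_postive_data_ls (idx : Int) (n_pos : Int) : List Int :=
  let div := PySem.Int.floordiv n_pos 2
  let mod := PySem.Int.mod n_pos 2
  let n_pos_ls :=
    if mod ≠ 0 then
      (PySem.List.pyRange (idx - div) (idx + div + 2) 1).map (fun pos_idx => pos_idx)
    else
      (PySem.List.pyRange (idx - div) (idx + div + 1) 1).map (fun pos_idx => pos_idx)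
  -- n_pos_ls.remove(idx): none = ValueError, excluded by Pre_
  (PySem.List.remove? n_pos_ls idx).getD []

-- ===== PORT B =====
def get_postive_data_ls_alt (idx : Int) (n_pos : Int) : List Int :=
  let div := PySem.Int.floordiv n_pos 2
  (PySem.List.pyRange 0 n_pos 1).map
    (fun k => idx - div + k + (if div ≤ k then 1 else 0))

-- ===== PRECONDITION & SPEC =====
-- For n_pos < 0 the range A builds is empty, so n_pos_ls.remove(idx) raises ValueError.
def Pre_get_postive_data_ls (idx : Int) (n_pos : Int) : Prop := 0 ≤ n_pos
instance (idx : Int) (n_pos : Int) : Decidable (Pre_get_postive_data_ls idx n_pos) := by unfold Pre_get_postive_data_ls; infer_instance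
def pvWitness_get_postive_data_ls : Int × Int := (3, 4)

-- For n_pos < 0 the range A builds is empty so remove(idx) raises ValueError; B returns []
-- (certified at the bottom by get_postive_data_ls_raises).
def Raises_get_postive_data_ls (idx : Int) (n_pos : Int) : Prop := n_pos < 0
instance (idx : Int) (n_pos : Int) : Decidable (Raises_get_postive_data_ls idx n_pos) := by unfold Raises_get_postive_data_ls; infer_instance
def pvRaiseWitness_get_postive_data_ls : Int × Int := (5, -1)
def pvRaiseWitnessOut_get_postive_data_ls : List Int := []

def Spec_get_postive_data_ls (idx : Int) (n_pos : Int) (out : List Int) : Prop := out = get_postive_data_ls_alt idx n_pos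
instance (idx : Int) (n_pos : Int) (out : List Int) : Decidable (Spec_get_postive_data_ls idx n_pos out) := by unfold Spec_get_postive_data_ls; infer_instance

-- ===== CLAIM (what is proved, stated in full; the proofs are below) =====
def Claim_equal_get_postive_data_ls : Prop := ∀ (idx : Int) (n_pos : Int), Dom_get_postive_data_ls idx n_pos → Pre_get_postive_data_ls idx n_pos → Spec_get_postive_data_ls idx n_pos (get_postive_data_ls idx n_pos)
def Claim_raises_get_postive_data_ls : Prop := (∀ (idx : Int) (n_pos : Int), Dom_get_postive_data_ls idx n_pos → Raises_get_postive_data_ls idx n_pos → ¬ Pre_get_postive_data_ls idx n_pos) ∧ (Dom_get_postive_data_ls (pvRaiseWitness_get_postive_data_ls.1) (pvRaiseWitness_get_postive_data_ls.2) ∧ Raises_get_postive_data_ls (pvRaiseWitness_get_postive_data_ls.1) (pvRaiseWitness_get_postive_data_ls.2) ∧ get_postive_data_ls_alt (pvRaiseWitness_get_postive_data_ls.1) (pvRaiseWitness_get_postive_data_ls.2) = pvRaiseWitnessOut_get_postive_data_ls)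

-- ===== LEMMAS AND PROOFS =====

-- remove? finds the shown occurrence when it is the first one
lemma remove_mid (L R : List Int) (v : Int) (h : v ∉ L) :
    PySem.List.remove? (L ++ v :: R) v = some (L ++ R) := by
  induction L with
  | nil => simp
  | cons x xs ih =>
    have hx : x ≠ v := by intro he; exact h (he ▸ List.mem_cons_self)
    have hxs : v ∉ xs := fun hm => h (List.mem_cons_of_mem _ hm)
    simp only [List.cons_append, PySem.List.remove?_cons_of_ne _ hx, ih hxs, Option.map_some]

-- shifting a unit-step range: map (c + ·) over range a..b is range (c+a)..(c+b)
lemma map_shift_pyRange (c a b : Int) :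
    (PySem.List.pyRange a b 1).map (fun k => c + k) = PySem.List.pyRange (c + a) (c + b) 1 := by
  simp only [PySem.List.pyRange_one, List.map_map]
  have hd : c + b - (c + a) = b - a := by ring
  rw [hd]
  exact List.map_congr_left (fun k _ => by simp [Function.comp]; ring)

-- ===== VERDICT (by name: the statement is the Claim_ definition above) =====
theorem get_postive_data_ls_spec : Claim_equal_get_postive_data_ls := by
  intro idx n_pos _ hpre
  unfold Spec_get_postive_data_ls
  have hpre' : (0:Int) ≤ n_pos := hpre
  have hd0 : 0 ≤ PySem.Int.floordiv n_pos 2 := by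
    rw [PySem.Int.floordiv_eq_ediv_of_pos (by norm_num)]; omega
  have hm01 : PySem.Int.mod n_pos 2 = 0 ∨ PySem.Int.mod n_pos 2 = 1 := by
    rw [PySem.Int.mod_eq_emod_of_pos (by norm_num)]; omega
  have hn : n_pos = 2 * PySem.Int.floordiv n_pos 2 + PySem.Int.mod n_pos 2 := by
    rw [PySem.Int.floordiv_eq_ediv_of_pos (by norm_num),
        PySem.Int.mod_eq_emod_of_pos (by norm_num)]; omega
  simp only [get_postive_data_ls, get_postive_data_ls_alt, List.map_id_fun', id]
  generalize hD : PySem.Int.floordiv n_pos 2 = d at hd0 hn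
  generalize hM : PySem.Int.mod n_pos 2 = m at hm01 hn
  -- A's side: one range around idx with idx removed
  have key : (if m ≠ 0 then PySem.List.pyRange (idx - d) (idx + d + 2) 1
      else PySem.List.pyRange (idx - d) (idx + d + 1) 1)
      = PySem.List.pyRange (idx - d) (idx + d + 1 + m) 1 := by
    rcases hm01 with h0 | h1
    · simp only [h0]; norm_num
    · have he : idx + d + 1 + (1:Int) = idx + d + 2 := by omega
      rw [h1, he]; norm_num
  rw [key,
    PySem.List.pyRange_one_append (idx - d) idx (idx + d + 1 + m) (by omega) (by omega),
    PySem.List.pyRange_one_cons (show idx < idx + d + 1 + m by omega),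
    remove_mid _ _ _ (by simp [PySem.List.mem_pyRange_one]), Option.getD_some]
  -- B's side: split the position range at d and resolve the if on each part
  rw [hn, show (0:Int) = 0 from rfl,
    PySem.List.pyRange_one_append 0 d (2 * d + m) (by omega) (by omega), List.map_append]
  have hleft : (PySem.List.pyRange 0 d 1).map
      (fun k => idx - d + k + (if d ≤ k then 1 else 0))
      = PySem.List.pyRange (idx - d) idx 1 := by
    have h1 : (PySem.List.pyRange 0 d 1).map
        (fun k => idx - d + k + (if d ≤ k then 1 else 0))
        = (PySem.List.pyRange 0 d 1).map (fun k => (idx - d) + k) := by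
      refine List.map_congr_left (fun k hk => ?_)
      rw [PySem.List.mem_pyRange_one] at hk
      rw [if_neg (by omega)]; ring
    rw [h1, map_shift_pyRange]
    have : idx - d + 0 = idx - d := by ring
    rw [this]
    have : idx - d + d = idx := by ring
    rw [this]
  have hright : (PySem.List.pyRange d (2 * d + m) 1).map
      (fun k => idx - d + k + (if d ≤ k then 1 else 0))
      = PySem.List.pyRange (idx + 1) (idx + d + 1 + m) 1 := by
    have h1 : (PySem.List.pyRange d (2 * d + m) 1).map
        (fun k => idx - d + k + (if d ≤ k then 1 else 0))
        = (PySem.List.pyRange d (2 * d + m) 1).map (fun k => (idx - d + 1) + k) := by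
      refine List.map_congr_left (fun k hk => ?_)
      rw [PySem.List.mem_pyRange_one] at hk
      rw [if_pos (by omega)]; ring
    rw [h1, map_shift_pyRange]
    have : idx - d + 1 + d = idx + 1 := by ring
    rw [this]
    have : idx - d + 1 + (2 * d + m) = idx + d + 1 + m := by ring
    rw [this]
  rw [hleft, hright]

@[simp]
theorem get_postive_data_ls_raises : Claim_raises_get_postive_data_ls := by
  unfold Claim_raises_get_postive_data_ls
  exact ⟨fun idx n_pos _ hr hp => by
    unfold Raises_get_postive_data_ls at hr
    unfold Pre_get_postive_data_ls at hp
    omega, by decide⟩
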